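-- pv_equiv track=rewrite | github.com/deLimaNicolas/exercises | outsite-leet/network-max-efficiency.py | getMaximumEfficiency
-- ===== SOURCE A (Python) =====
-- def getMaximumEfficiency(connect_nodes, connect_from, connect_to, computer_val, k):
--     """
--     TODO: Implement your solution here
--
--     Args:
--         connect_nodes (int): Number of nodes in the system
--         connect_from (list[int]): Origin nodes of edges (1-indexed)
--         connect_to (list[int]): Destination nodes of edges (1-indexed)
--         computer_val (list[int]): Values of each computer node (0-indexed)
--         k (int): Efficiency parameter
--
--     Returns:
--         int: Maximum possible efficiency
--     """
--     from collections import defaultdict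
--
--     adj = defaultdict(list)
--     for idx in range(len(connect_from)):
--         src = connect_from[idx] - 1
--         dst = connect_to[idx] - 1
--
--         adj[src].append(dst)
--         adj[dst].append(src)
--     #(sum of values of all remaining computer nodes - k * num_ops).
--     visited = set()
--     def get_max(node):
--         visited.add(node)
--         take_sum = computer_val[node]
--         delete_ops = 0
--
--         for child in adj[node]:
--             if child not in visited:
--                 take_child_sum, take_child_ops = get_max(child)
--                 take_child_efficiency = take_child_sum - k * take_child_ops
--                 delete_child_efficiency = -k
--                 if take_child_efficiency >= delete_child_efficiency:
--                     take_sum += take_child_sum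
--                     delete_ops += take_child_ops
--                 else:
--                     delete_ops += 1
--
--         return take_sum, delete_ops
--
--     total_sum, total_ops = get_max(0)
--     return total_sum - k * total_ops
-- ===== SOURCE B (Python) =====
-- def getMaximumEfficiency(connect_nodes, connect_from, connect_to, computer_val, k):
--     # Iterative DFS with an explicit frame stack instead of A's recursive get_max
--     # (same return value; avoids Python recursion).
--     adj = {}
--     for s, d in zip(connect_from, connect_to):
--         adj.setdefault(s - 1, []).append(d - 1)
--         adj.setdefault(d - 1, []).append(s - 1)
--
--     visited = {0}
--     # frame: (node, remaining children, take_sum, delete_ops)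
--     stack = [(0, adj.get(0, []), computer_val[0], 0)]
--     result = 0
--     while stack:
--         node, rem, ts, ops = stack[-1]
--         if rem:
--             c = rem[0]
--             stack[-1] = (node, rem[1:], ts, ops)
--             if c not in visited:
--                 visited.add(c)
--                 stack.append((c, adj.get(c, []), computer_val[c], 0))
--         else:
--             stack.pop()
--             if stack:
--                 pn, prem, pts, pops = stack[-1]
--                 if ts - k * ops >= -k:
--                     stack[-1] = (pn, prem, pts + ts, pops + ops)
--                 else:
--                     stack[-1] = (pn, prem, pts, pops + 1)
--             else:
--                 result = ts - k * ops
--     return result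
-- ===== Notes on version B (the rewrite author's own statement) =====
-- stated objective: alternative
-- what changed: Replaces A's recursive get_max (shared mutable visited set, Python call stack) with an explicit iterative DFS: a while loop over a stack of frames (node, remaining children, take_sum, delete_ops) that pushes a frame on the first visit of a child and folds a finished frame's pair into its parent with the same take/delete comparison.
import Mathlib
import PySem

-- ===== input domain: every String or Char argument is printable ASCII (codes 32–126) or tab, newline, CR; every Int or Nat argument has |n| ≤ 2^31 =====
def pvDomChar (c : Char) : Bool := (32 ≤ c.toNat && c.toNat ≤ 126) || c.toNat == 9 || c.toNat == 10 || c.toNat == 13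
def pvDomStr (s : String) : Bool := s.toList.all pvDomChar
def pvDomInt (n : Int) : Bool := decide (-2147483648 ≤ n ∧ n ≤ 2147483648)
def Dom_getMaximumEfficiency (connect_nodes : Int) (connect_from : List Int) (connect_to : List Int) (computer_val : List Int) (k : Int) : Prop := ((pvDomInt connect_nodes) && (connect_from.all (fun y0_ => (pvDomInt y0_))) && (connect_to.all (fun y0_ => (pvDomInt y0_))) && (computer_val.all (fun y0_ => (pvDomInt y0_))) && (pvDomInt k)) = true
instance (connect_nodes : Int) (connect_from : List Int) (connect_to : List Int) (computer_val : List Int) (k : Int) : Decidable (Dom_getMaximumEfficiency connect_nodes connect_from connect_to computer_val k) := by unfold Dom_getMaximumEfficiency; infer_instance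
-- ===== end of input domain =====

-- B replaces A's recursive tree DP (recursive get_max over a shared visited set) by an
-- explicit iterative DFS over a stack of frames, folding each finished frame into its parent
-- with the same take/delete comparison; same return value on Pre_ (objective: alternative).

-- ===== PORT A =====

-- adjacency building loop: `for idx in range(len(connect_from)): adj[src].append(dst); adj[dst].append(src)`
-- (the indices idx are always in range for connect_from, so `getD idx 0` equals Python's
--  connect_from[idx] there, and equals connect_to[idx] whenever connect_to is long enough —
--  Pre_ guarantees that)
def pvBuildAdj (connect_from connect_to : List Int) : PySem.Dict Int (List Int) :=
  (List.range connect_from.length).foldl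
    (fun adj idx =>
      let src := connect_from.getD idx 0 - 1
      let dst := connect_to.getD idx 0 - 1
      (adj.modify src [] (· ++ [dst])).modify dst [] (· ++ [src]))
    PySem.Dict.empty

-- the `for child in adj[node]` loop of get_max, threading (take_sum, delete_ops, visited);
-- `getmax` is the recursive call at the next-smaller fuel
def pvFoldC (k : Int)
    (getmax : PySem.Set Int → Int → Option ((Int × Int) × PySem.Set Int)) :
    PySem.Set Int → List Int → Int → Int → Option ((Int × Int) × PySem.Set Int)
  | vis, [], ts, ops => some ((ts, ops), vis)
  | vis, c :: rest, ts, ops =>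
    if c ∈ vis then pvFoldC k getmax vis rest ts ops
    else
      match getmax vis c with
      | none => none
      | some ((cs, co), vis') =>
        if cs - k * co ≥ -k then pvFoldC k getmax vis' rest (ts + cs) (ops + co)
        else pvFoldC k getmax vis' rest ts (ops + 1)

-- A's recursive `get_max(node)`; the fuel argument is only a totality guard (Python has no fuel):
-- under Pre_ the fuel used below is proved sufficient. `none` = IndexError on computer_val[node].
def pvGetMax (computer_val : List Int) (k : Int) (adj : PySem.Dict Int (List Int)) :
    Nat → PySem.Set Int → Int → Option ((Int × Int) × PySem.Set Int)
  | 0, _, _ => none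
  | n + 1, vis, node =>
    let vis1 := PySem.Set.add vis node
    match PySem.List.pyGet? computer_val node with
    | none => none
    | some tv => pvFoldC k (pvGetMax computer_val k adj n) vis1 (adj.getD node []) tv 0

def getMaximumEfficiency (connect_nodes : Int) (connect_from : List Int) (connect_to : List Int) (computer_val : List Int) (k : Int) : Int :=
  let adj := pvBuildAdj connect_from connect_to
  match pvGetMax computer_val k adj (2 * computer_val.length + 1) PySem.Set.empty 0 with
  | some ((s, o), _) => s - k * o
  | none => 0   -- unreached under Pre_ (fuel sufficiency and index validity are proved below)

-- ===== PORT B =====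

-- `for s, d in zip(connect_from, connect_to): adj.setdefault(s-1,[]).append(d-1); adj.setdefault(d-1,[]).append(s-1)`
def pvBuildAdjB (connect_from connect_to : List Int) : PySem.Dict Int (List Int) :=
  (connect_from.zip connect_to).foldl
    (fun adj p =>
      let s := p.1 - 1
      let d := p.2 - 1
      (adj.modify s [] (· ++ [d])).modify d [] (· ++ [s]))
    PySem.Dict.empty

-- B's while loop over the frame stack; a frame is (node, remaining children, take_sum, delete_ops).
-- Fuel is only a totality guard (the Python loop needs none); `none` also covers the IndexError
-- of computer_val[c]. Under Pre_ the fuel chosen below is proved sufficient.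
def pvRun (computer_val : List Int) (k : Int) (adj : PySem.Dict Int (List Int)) :
    Nat → PySem.Set Int → List (Int × List Int × Int × Int) → Option Int
  | 0, _, _ => none
  | _ + 1, _, [] => none   -- Python: loop exits with `result` already set; modeled at the final pop below
  | n + 1, vis, (node, rem, ts, ops) :: rest =>
    match rem with
    | c :: rem' =>
      if c ∈ vis then pvRun computer_val k adj n vis ((node, rem', ts, ops) :: rest)
      else
        match PySem.List.pyGet? computer_val c with
        | none => none
        | some cv =>
          pvRun computer_val k adj n (PySem.Set.add vis c)
            ((c, adj.getD c [], cv, 0) :: (node, rem', ts, ops) :: rest)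
    | [] =>
      match rest with
      | [] => some (ts - k * ops)
      | (pn, prem, pts, pops) :: rrest =>
        if ts - k * ops ≥ -k then pvRun computer_val k adj n vis ((pn, prem, pts + ts, pops + ops) :: rrest)
        else pvRun computer_val k adj n vis ((pn, prem, pts, pops + 1) :: rrest)

def getMaximumEfficiency_alt (connect_nodes : Int) (connect_from : List Int) (connect_to : List Int) (computer_val : List Int) (k : Int) : Int :=
  let adj := pvBuildAdjB connect_from connect_to
  match PySem.List.pyGet? computer_val 0 with
  | none => 0   -- Python B raises IndexError on empty computer_val; excluded by Pre_
  | some v0 =>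
    (pvRun computer_val k adj
        ((2 * connect_from.length + 2) * (2 * computer_val.length) + 2 * connect_from.length + 2)
        (PySem.Set.add PySem.Set.empty 0)
        [(0, adj.getD 0 [], v0, 0)]).getD 0

-- ===== PRECONDITION & SPEC =====

-- the set of node labels reachable from node 0 through the edges {connect_from[i]-1, connect_to[i]-1}
-- (standard BFS closure of the edge graph; it mentions only the input, not either port's algorithm)
def pvAddNew (x : Int) (S : List Int) : List Int := if x ∈ S then S else S ++ [x]
def pvStepT (T : List Int) (p : Int × Int) : List Int :=
  if p.1 ∈ T ∨ p.2 ∈ T then pvAddNew p.2 (pvAddNew p.1 T) else T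
def pvReachN (es : List (Int × Int)) : Nat → List Int
  | 0 => [0]
  | n + 1 => es.foldl pvStepT (pvReachN es n)
def pvEdges (cf ct : List Int) : List (Int × Int) := (cf.zip ct).map (fun p => (p.1 - 1, p.2 - 1))
def pvReach (cf ct : List Int) : List Int := pvReachN (pvEdges cf ct) (2 * cf.length + 1)

-- Pre_ excludes exactly the inputs on which A raises IndexError: empty computer_val
-- (computer_val[0]), connect_to shorter than connect_from (connect_to[idx]), and graphs in
-- which some node reachable from node 0 carries a label that is not a Python-indexable
-- position of computer_val (computer_val[node] inside the traversal).
def Pre_getMaximumEfficiency (connect_nodes : Int) (connect_from : List Int) (connect_to : List Int) (computer_val : List Int) (k : Int) : Prop :=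
  computer_val ≠ [] ∧ connect_from.length ≤ connect_to.length ∧
  ∀ x ∈ pvReach connect_from connect_to,
    -(computer_val.length : Int) ≤ x ∧ x < computer_val.length

instance (connect_nodes : Int) (connect_from : List Int) (connect_to : List Int) (computer_val : List Int) (k : Int) : Decidable (Pre_getMaximumEfficiency connect_nodes connect_from connect_to computer_val k) := by unfold Pre_getMaximumEfficiency; infer_instance

def pvWitness_getMaximumEfficiency : Int × List Int × List Int × List Int × Int := (2, [1], [2], [5, 7], 1)

def Spec_getMaximumEfficiency (connect_nodes : Int) (connect_from : List Int) (connect_to : List Int) (computer_val : List Int) (k : Int) (out : Int) : Prop := out = getMaximumEfficiency_alt connect_nodes connect_from connect_to computer_val k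
instance (connect_nodes : Int) (connect_from : List Int) (connect_to : List Int) (computer_val : List Int) (k : Int) (out : Int) : Decidable (Spec_getMaximumEfficiency connect_nodes connect_from connect_to computer_val k out) := by unfold Spec_getMaximumEfficiency; infer_instance

-- ===== CLAIM (what is proved, stated in full; the proofs are below) =====
def Claim_equal_getMaximumEfficiency : Prop := ∀ (connect_nodes : Int) (connect_from : List Int) (connect_to : List Int) (computer_val : List Int) (k : Int), Dom_getMaximumEfficiency connect_nodes connect_from connect_to computer_val k → Pre_getMaximumEfficiency connect_nodes connect_from connect_to computer_val k → Spec_getMaximumEfficiency connect_nodes connect_from connect_to computer_val k (getMaximumEfficiency connect_nodes connect_from connect_to computer_val k)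

-- ===== LEMMAS AND PROOFS =====

-- a node label is "good" when it is a Python-indexable index into computer_val
def pvGood (len : Nat) (c : Int) : Prop := -(len : Int) ≤ c ∧ c < len

-- number of still-unvisited good labels (the fuel/step budget)
noncomputable def pvUC (len : Nat) (vis : PySem.Set Int) : Nat :=
  ((Finset.Icc (-(len : Int)) ((len : Int) - 1)).filter (fun x => x ∉ vis)).card

lemma pvGet_isSome (xs : List Int) (c : Int) (h : pvGood xs.length c) :
    ∃ v, PySem.List.pyGet? xs c = some v := by
  obtain ⟨h1, h2⟩ := h
  rw [← Option.isSome_iff_exists]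
  simp only [PySem.List.pyGet?, PySem.List.pyIdx?]
  split_ifs with g1 g2 g3 <;> simp <;> omega

lemma pvUC_le (len : Nat) (vis : PySem.Set Int) : pvUC len vis ≤ 2 * len := by
  have h1 : pvUC len vis ≤ (Finset.Icc (-(len : Int)) ((len : Int) - 1)).card :=
    Finset.card_le_card (Finset.filter_subset _ _)
  have h2 : (Finset.Icc (-(len : Int)) ((len : Int) - 1)).card = 2 * len := by
    rw [Int.card_Icc]; omega
  omega

lemma pvUC_antitone (len : Nat) (vis vis' : PySem.Set Int)
    (h : ∀ x ∈ vis, x ∈ vis') : pvUC len vis' ≤ pvUC len vis := by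
  apply Finset.card_le_card
  intro x hx
  simp only [Finset.mem_filter] at hx ⊢
  exact ⟨hx.1, fun hmem => hx.2 (h x hmem)⟩

lemma pvUC_add (len : Nat) (vis : PySem.Set Int) (c : Int)
    (hg : pvGood len c) (hc : c ∉ vis) :
    pvUC len vis = pvUC len (PySem.Set.add vis c) + 1 := by
  unfold pvUC
  have hfe : (Finset.Icc (-(len : Int)) ((len : Int) - 1)).filter (fun x => x ∉ PySem.Set.add vis c)
      = ((Finset.Icc (-(len : Int)) ((len : Int) - 1)).filter (fun x => x ∉ vis)).erase c := by
    ext x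
    simp only [Finset.mem_erase, Finset.mem_filter, PySem.Set.mem_add]
    tauto
  have hcmem : c ∈ (Finset.Icc (-(len : Int)) ((len : Int) - 1)).filter (fun x => x ∉ vis) := by
    simp only [Finset.mem_filter, Finset.mem_Icc]
    exact ⟨⟨hg.1, by have := hg.2; omega⟩, hc⟩
  rw [hfe, Finset.card_erase_of_mem hcmem]
  have := Finset.card_pos.mpr ⟨c, hcmem⟩
  omega

-- ---- reachability closure lemmas ----

lemma pvAddNew_mem (x y : Int) (T : List Int) : y ∈ pvAddNew x T ↔ y ∈ T ∨ y = x := by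
  unfold pvAddNew
  split_ifs with h
  · constructor
    · exact Or.inl
    · rintro (hy | rfl)
      · exact hy
      · exact h
  · simp

lemma pvStepT_sub (T : List Int) (p : Int × Int) : ∀ y ∈ T, y ∈ pvStepT T p := by
  intro y hy
  unfold pvStepT
  split_ifs
  · rw [pvAddNew_mem, pvAddNew_mem]
    exact Or.inl (Or.inl hy)
  · exact hy

lemma pvStepT_collapse (T : List Int) (p : Int × Int)
    (h : ∀ y ∈ pvStepT T p, y ∈ T) : pvStepT T p = T := by
  unfold pvStepT at *
  split_ifs at h ⊢ with hc
  · have hp1 : p.1 ∈ T := by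
      apply h
      rw [pvAddNew_mem, pvAddNew_mem]
      exact Or.inl (Or.inr rfl)
    have hp2 : p.2 ∈ T := by
      apply h
      rw [pvAddNew_mem]
      exact Or.inr rfl
    have e1 : pvAddNew p.1 T = T := by unfold pvAddNew; rw [if_pos hp1]
    rw [e1]
    unfold pvAddNew
    rw [if_pos hp2]
  · rfl

lemma pvAddNew_len_le (x : Int) (T : List Int) : T.length ≤ (pvAddNew x T).length := by
  unfold pvAddNew
  split_ifs
  · exact le_refl _
  · simp

lemma pvAddNew_len_lt (x : Int) (T : List Int) (h : x ∉ T) : T.length < (pvAddNew x T).length := by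
  unfold pvAddNew
  rw [if_neg h]
  simp

lemma pvStepT_len_le (T : List Int) (p : Int × Int) : T.length ≤ (pvStepT T p).length := by
  unfold pvStepT
  split_ifs
  · exact le_trans (pvAddNew_len_le p.1 T) (pvAddNew_len_le p.2 _)
  · exact le_refl _

lemma pvStepT_grow (T : List Int) (p : Int × Int) :
    pvStepT T p = T ∨ T.length < (pvStepT T p).length := by
  unfold pvStepT
  split_ifs with hc
  · by_cases h1 : p.1 ∈ T
    · have e1 : pvAddNew p.1 T = T := by unfold pvAddNew; rw [if_pos h1]
      rw [e1]
      by_cases h2 : p.2 ∈ T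
      · left
        unfold pvAddNew
        rw [if_pos h2]
      · right
        exact pvAddNew_len_lt p.2 T h2
    · right
      have ha := pvAddNew_len_lt p.1 T h1
      have hb := pvAddNew_len_le p.2 (pvAddNew p.1 T)
      omega
  · exact Or.inl rfl

lemma pvFoldT_sub (es : List (Int × Int)) : ∀ T : List Int, ∀ y ∈ T, y ∈ es.foldl pvStepT T := by
  induction es with
  | nil => intro T y hy; exact hy
  | cons p rest ih =>
    intro T y hy
    exact ih (pvStepT T p) y (pvStepT_sub T p y hy)

lemma pvFoldT_len (es : List (Int × Int)) : ∀ T : List Int, T.length ≤ (es.foldl pvStepT T).length := by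
  induction es with
  | nil => intro T; exact le_refl _
  | cons p rest ih =>
    intro T
    rw [List.foldl_cons]
    exact le_trans (pvStepT_len_le T p) (ih (pvStepT T p))

lemma pvFoldT_grow (es : List (Int × Int)) :
    ∀ T : List Int, es.foldl pvStepT T = T ∨ T.length < (es.foldl pvStepT T).length := by
  induction es with
  | nil => intro T; exact Or.inl rfl
  | cons p rest ih =>
    intro T
    rw [List.foldl_cons]
    rcases pvStepT_grow T p with h | h
    · rw [h]
      exact ih T
    · right
      exact lt_of_lt_of_le h (pvFoldT_len rest (pvStepT T p))

-- if one whole round is a fixpoint, the set is closed under every edge, both ways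
lemma pvFoldT_closed (es : List (Int × Int)) :
    ∀ T : List Int, es.foldl pvStepT T = T →
      ∀ p ∈ es, (p.1 ∈ T → p.2 ∈ T) ∧ (p.2 ∈ T → p.1 ∈ T) := by
  induction es with
  | nil => intro T _ p hp; cases hp
  | cons q rest ih =>
    intro T hfix p hp
    have hfix' : rest.foldl pvStepT (pvStepT T q) = T := hfix
    have hsubT : ∀ y ∈ pvStepT T q, y ∈ T := by
      intro y hy
      have := pvFoldT_sub rest (pvStepT T q) y hy
      rw [hfix'] at this
      exact this
    have hTq : pvStepT T q = T := pvStepT_collapse T q hsubT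
    rcases List.mem_cons.mp hp with rfl | hp
    · constructor
      · intro h1
        have hc : p.1 ∈ T ∨ p.2 ∈ T := Or.inl h1
        have : p.2 ∈ pvStepT T p := by
          unfold pvStepT
          rw [if_pos hc, pvAddNew_mem]
          exact Or.inr rfl
        rw [hTq] at this
        exact this
      · intro h2
        have hc : p.1 ∈ T ∨ p.2 ∈ T := Or.inr h2
        have : p.1 ∈ pvStepT T p := by
          unfold pvStepT
          rw [if_pos hc, pvAddNew_mem, pvAddNew_mem]
          exact Or.inl (Or.inr rfl)
        rw [hTq] at this
        exact this
    · rw [hTq] at hfix'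
      exact ih T hfix' p hp

-- every element of a round is 0 or an edge endpoint
lemma pvStepT_elems (T : List Int) (p : Int × Int) :
    ∀ y ∈ pvStepT T p, y ∈ T ∨ y = p.1 ∨ y = p.2 := by
  intro y hy
  unfold pvStepT at hy
  split_ifs at hy
  · rw [pvAddNew_mem, pvAddNew_mem] at hy
    tauto
  · exact Or.inl hy

lemma pvFoldT_elems (es : List (Int × Int)) :
    ∀ T : List Int, ∀ y ∈ es.foldl pvStepT T, y ∈ T ∨ ∃ p ∈ es, y = p.1 ∨ y = p.2 := by
  induction es with
  | nil => intro T y hy; exact Or.inl hy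
  | cons q rest ih =>
    intro T y hy
    rcases ih (pvStepT T q) y hy with h | ⟨p, hp, he⟩
    · rcases pvStepT_elems T q y h with h' | h'
      · exact Or.inl h'
      · exact Or.inr ⟨q, by simp, h'⟩
    · exact Or.inr ⟨p, by simp [hp], he⟩

lemma pvReachN_elems (es : List (Int × Int)) (n : Nat) :
    ∀ y ∈ pvReachN es n, y = 0 ∨ ∃ p ∈ es, y = p.1 ∨ y = p.2 := by
  induction n with
  | zero => intro y hy; simp only [pvReachN, List.mem_singleton] at hy; exact Or.inl hy
  | succ m ih =>
    intro y hy
    rcases pvFoldT_elems es (pvReachN es m) y hy with h | h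
    · exact ih y h
    · exact Or.inr h

lemma pvAddNew_nodup (x : Int) (T : List Int) (h : T.Nodup) : (pvAddNew x T).Nodup := by
  unfold pvAddNew
  split_ifs with hx
  · exact h
  · rw [List.nodup_append]
    refine ⟨h, List.nodup_singleton x, ?_⟩
    intro a ha b hb
    rw [List.mem_singleton] at hb
    subst hb
    exact fun e => hx (e ▸ ha)

lemma pvStepT_nodup (T : List Int) (p : Int × Int) (h : T.Nodup) : (pvStepT T p).Nodup := by
  unfold pvStepT
  split_ifs
  · exact pvAddNew_nodup _ _ (pvAddNew_nodup _ _ h)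
  · exact h

lemma pvFoldT_nodup (es : List (Int × Int)) : ∀ T : List Int, T.Nodup → (es.foldl pvStepT T).Nodup := by
  induction es with
  | nil => intro T h; exact h
  | cons q rest ih => intro T h; exact ih _ (pvStepT_nodup T q h)

lemma pvReachN_nodup (es : List (Int × Int)) (n : Nat) : (pvReachN es n).Nodup := by
  induction n with
  | zero => simp [pvReachN]
  | succ m ih => exact pvFoldT_nodup es _ ih

-- size bound: a round's set has at most 2·|es| + 1 elements
lemma pvReachN_len (es : List (Int × Int)) (n : Nat) :
    (pvReachN es n).length ≤ 2 * es.length + 1 := by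
  have hsub : (pvReachN es n).toFinset ⊆ (0 :: (es.map Prod.fst ++ es.map Prod.snd)).toFinset := by
    intro y hy
    rw [List.mem_toFinset] at hy ⊢
    rcases pvReachN_elems es n y hy with rfl | ⟨p, hp, he⟩
    · simp
    · rcases he with rfl | rfl
      · simp only [List.mem_cons, List.mem_append, List.mem_map]
        exact Or.inr (Or.inl ⟨p, hp, rfl⟩)
      · simp only [List.mem_cons, List.mem_append, List.mem_map]
        exact Or.inr (Or.inr ⟨p, hp, rfl⟩)
  have h1 : (pvReachN es n).toFinset.card = (pvReachN es n).length :=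
    List.toFinset_card_of_nodup (pvReachN_nodup es n)
  have h2 := Finset.card_le_card hsub
  have h3 := List.toFinset_card_le (0 :: (es.map Prod.fst ++ es.map Prod.snd))
  simp only [List.length_cons, List.length_append, List.length_map] at h3
  omega

lemma pvReachN_stable (es : List (Int × Int)) (n : Nat)
    (h : pvReachN es (n + 1) = pvReachN es n) :
    pvReachN es (n + 2) = pvReachN es (n + 1) := by
  show es.foldl pvStepT (pvReachN es (n + 1)) = pvReachN es (n + 1)
  rw [h]
  exact h

lemma pvReachN_fix_or_big (es : List (Int × Int)) :
    ∀ n, pvReachN es (n + 1) = pvReachN es n ∨ n + 2 ≤ (pvReachN es (n + 1)).length := by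
  intro n
  induction n with
  | zero =>
    rcases pvFoldT_grow es (pvReachN es 0) with h | h
    · exact Or.inl h
    · right
      have h0 : (pvReachN es 0).length = 1 := rfl
      rw [show pvReachN es (0 + 1) = es.foldl pvStepT (pvReachN es 0) from rfl]
      omega
  | succ m ih =>
    rcases ih with h | h
    · exact Or.inl (pvReachN_stable es m h)
    · rcases pvFoldT_grow es (pvReachN es (m + 1)) with h2 | h2
      · exact Or.inl h2
      · right
        rw [show pvReachN es (m + 1 + 1) = es.foldl pvStepT (pvReachN es (m + 1)) from rfl]
        omega

-- the iterated round at fuel 2·|es|+1 is a fixpoint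
lemma pvReach_fix (es : List (Int × Int)) :
    es.foldl pvStepT (pvReachN es (2 * es.length + 1)) = pvReachN es (2 * es.length + 1) := by
  -- first find a fixpoint index ≤ 2·|es|+1, then propagate it upward
  have key : ∀ j : Nat, pvReachN es (j + 1) = pvReachN es j ∨ j + 2 ≤ (pvReachN es (j + 1)).length :=
    pvReachN_fix_or_big es
  have exfix : ∃ i ≤ 2 * es.length, pvReachN es (i + 1) = pvReachN es i := by
    by_contra hno
    push_neg at hno
    have hall : ∀ i ≤ 2 * es.length, i + 2 ≤ (pvReachN es (i + 1)).length := by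
      intro i hi
      rcases key i with h | h
      · exact absurd h (hno i hi)
      · exact h
    have := hall (2 * es.length) (le_refl _)
    have hb := pvReachN_len es (2 * es.length + 1)
    omega
  obtain ⟨i, hi, hfix⟩ := exfix
  have hup : ∀ m, pvReachN es (i + m) = pvReachN es i := by
    intro m
    induction m with
    | zero => rfl
    | succ t iht =>
      show es.foldl pvStepT (pvReachN es (i + t)) = pvReachN es i
      rw [iht]
      exact hfix
  have h1 : pvReachN es (2 * es.length + 1) = pvReachN es i := by
    have := hup (2 * es.length + 1 - i)
    rwa [show i + (2 * es.length + 1 - i) = 2 * es.length + 1 by omega] at this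
  rw [h1]
  exact hfix

lemma pvReach_zero_mem (es : List (Int × Int)) (n : Nat) : (0 : Int) ∈ pvReachN es n := by
  induction n with
  | zero => simp [pvReachN]
  | succ m ih => exact pvFoldT_sub es _ 0 ih

-- the reachable set is closed under every edge, both ways
lemma pvReach_closed (cf ct : List Int) :
    ∀ p ∈ pvEdges cf ct,
      (p.1 ∈ pvReach cf ct → p.2 ∈ pvReach cf ct) ∧ (p.2 ∈ pvReach cf ct → p.1 ∈ pvReach cf ct) := by
  intro p hp
  have hfix := pvReach_fix (pvEdges cf ct)
  have hlen : (pvEdges cf ct).length ≤ cf.length := by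
    simp only [pvEdges, List.length_map, List.length_zip]
    omega
  -- pvReach uses fuel 2·|cf|+1 ≥ 2·|es|+1; show it is a fixpoint too
  have hmono : ∀ a b : Nat, a ≤ b →
      pvReachN (pvEdges cf ct) a = pvReachN (pvEdges cf ct) (2 * (pvEdges cf ct).length + 1) →
      2 * (pvEdges cf ct).length + 1 ≤ a →
      pvReachN (pvEdges cf ct) b = pvReachN (pvEdges cf ct) (2 * (pvEdges cf ct).length + 1) := by
    intro a b hab ha hge
    induction b with
    | zero =>
      have : a = 0 := by omega
      rw [← this]; exact ha
    | succ t iht =>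
      by_cases he : a = t + 1
      · rw [← he]; exact ha
      · have ht := iht (by omega)
        show (pvEdges cf ct).foldl pvStepT (pvReachN (pvEdges cf ct) t) = _
        rw [ht]
        exact pvReach_fix (pvEdges cf ct)
  have hfp : (pvEdges cf ct).foldl pvStepT (pvReach cf ct) = pvReach cf ct := by
    unfold pvReach
    have := hmono (2 * (pvEdges cf ct).length + 1) (2 * cf.length + 1) (by omega) rfl (le_refl _)
    rw [this]
    exact pvReach_fix (pvEdges cf ct)
  exact pvFoldT_closed (pvEdges cf ct) (pvReach cf ct) hfp p hp

-- one iteration of the adjacency-building loop, written without `let` (definitionally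
-- equal to the step functions of both ports)
def pvStep (cf ct : List Int) (adj : PySem.Dict Int (List Int)) (idx : Nat) : PySem.Dict Int (List Int) :=
  (adj.modify (cf.getD idx 0 - 1) [] (· ++ [ct.getD idx 0 - 1])).modify (ct.getD idx 0 - 1) [] (· ++ [cf.getD idx 0 - 1])

lemma pvBuildAdj_eq_foldStep (cf ct : List Int) :
    pvBuildAdj cf ct = (List.range cf.length).foldl (pvStep cf ct) PySem.Dict.empty := rfl

-- closure of the built adjacency under any predicate Q that is edge-symmetric
lemma pvFoldStep_good (cf ct : List Int) (Q : Int → Prop) :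
    ∀ (l : List Nat) (d : PySem.Dict Int (List Int)),
      (∀ x, Q x → ∀ c ∈ d.getD x [], Q c) →
      (∀ i ∈ l, (Q (cf.getD i 0 - 1) ↔ Q (ct.getD i 0 - 1))) →
      ∀ x, Q x → ∀ c ∈ (l.foldl (pvStep cf ct) d).getD x [], Q c := by
  intro l
  induction l with
  | nil => intro d hd _ x hx c hc; exact hd x hx c hc
  | cons i t ih =>
    intro d hd hl x hx c hc
    have hiff := hl i (by simp)
    refine ih _ ?_ (fun j hj => hl j (by simp [hj])) x hx c hc
    intro y hy e he
    simp only [pvStep, PySem.Dict.getD_modify] at he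
    split_ifs at he with h1 h2 h3
    -- y = ct_i - 1 and ct_i - 1 = cf_i - 1
    · simp only [List.mem_append, List.mem_singleton] at he
      rcases he with (he | rfl) | rfl
      · exact hd _ (h2 ▸ h1 ▸ hy) _ he
      · exact h1 ▸ hy
      · exact h2 ▸ h1 ▸ hy
    -- y = ct_i - 1 ≠ cf_i - 1
    · simp only [List.mem_append, List.mem_singleton] at he
      rcases he with he | rfl
      · exact hd _ (h1 ▸ hy) _ he
      · exact hiff.mpr (h1 ▸ hy)
    -- y ≠ ct_i - 1, y = cf_i - 1
    · simp only [List.mem_append, List.mem_singleton] at he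
      rcases he with he | rfl
      · exact hd _ (h3 ▸ hy) _ he
      · exact hiff.mp (h3 ▸ hy)
    -- y touches neither endpoint
    · exact hd _ hy _ he

lemma pvBuildAdj_good (cf ct : List Int) (Q : Int → Prop)
    (hedge : ∀ i < cf.length, (Q (cf.getD i 0 - 1) ↔ Q (ct.getD i 0 - 1))) :
    ∀ x, Q x → ∀ c ∈ (pvBuildAdj cf ct).getD x [], Q c := by
  rw [pvBuildAdj_eq_foldStep]
  refine pvFoldStep_good cf ct Q _ _ (fun x _ c hc => by simp [PySem.Dict.getD_empty] at hc) ?_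
  intro i hi
  rw [List.mem_range] at hi
  exact hedge i hi

lemma pvFoldStep_len (cf ct : List Int) :
    ∀ (l : List Nat) (d : PySem.Dict Int (List Int)) (b : Nat),
      (∀ x, (d.getD x []).length ≤ b) →
      ∀ x, ((l.foldl (pvStep cf ct) d).getD x []).length ≤ b + 2 * l.length := by
  intro l
  induction l with
  | nil => intro d b hd x; simpa using hd x
  | cons i t ih =>
    intro d b hd x
    have h2 : ∀ y, ((pvStep cf ct d i).getD y []).length ≤ b + 2 := by
      intro y
      simp only [pvStep, PySem.Dict.getD_modify]
      have ha := hd (cf.getD i 0 - 1)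
      have hb := hd (ct.getD i 0 - 1)
      have hy := hd y
      split_ifs
      all_goals first
        | omega
        | (simp only [List.length_append, List.length_cons, List.length_nil]; omega)
    have := ih (pvStep cf ct d i) (b + 2) h2 x
    have hg : List.foldl (pvStep cf ct) d (i :: t) = List.foldl (pvStep cf ct) (pvStep cf ct d i) t := rfl
    rw [hg, List.length_cons]
    omega

-- every adjacency list built by the loop has at most 2·|connect_from| entries
lemma pvBuildAdj_len (cf ct : List Int) :
    ∀ x, ((pvBuildAdj cf ct).getD x []).length ≤ 2 * cf.length := by
  intro x
  rw [pvBuildAdj_eq_foldStep]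
  have := pvFoldStep_len cf ct (List.range cf.length) PySem.Dict.empty 0
    (fun y => by simp [PySem.Dict.getD_empty]) x
  simpa using this

-- the i-th entries of range/getD and of zip agree when connect_to is long enough
lemma pvZip_eq (cf ct : List Int) (h : cf.length ≤ ct.length) :
    cf.zip ct = (List.range cf.length).map (fun i => (cf.getD i 0, ct.getD i 0)) := by
  apply List.ext_getElem
  · simp [List.length_zip]; omega
  · intro i h1 h2
    simp only [List.getElem_zip, List.getElem_map, List.getElem_range]
    have hi : i < cf.length := by simp [List.length_zip] at h1; omega
    rw [List.getD_eq_getElem cf 0 hi, List.getD_eq_getElem ct 0 (by omega)]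

-- B's zip-based builder produces the same dict as A's index loop when connect_to is long enough
lemma pvBuildAdjB_eq (cf ct : List Int) (h : cf.length ≤ ct.length) :
    pvBuildAdjB cf ct = pvBuildAdj cf ct := by
  show (cf.zip ct).foldl _ _ = _
  rw [pvZip_eq cf ct h, List.foldl_map, pvBuildAdj_eq_foldStep]
  rfl

-- the visited set only grows through the children loop
lemma pvFoldC_mono (cv : List Int) (k : Int) (adj : PySem.Dict Int (List Int)) :
    ∀ n rem vis ts ops out vis',
      pvFoldC k (pvGetMax cv k adj n) vis rem ts ops = some (out, vis') →
      ∀ x ∈ vis, x ∈ vis' := by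
  intro n
  induction n using Nat.strong_induction_on with
  | _ n ihn =>
    intro rem
    induction rem with
    | nil =>
      intro vis ts ops out vis' h x hx
      simp only [pvFoldC, Option.some_inj, Prod.mk.injEq] at h
      rw [← h.2]
      exact hx
    | cons c rest ihr =>
      intro vis ts ops out vis' h x hx
      simp only [pvFoldC] at h
      by_cases hc : c ∈ vis
      · rw [if_pos hc] at h
        exact ihr vis ts ops out vis' h x hx
      · rw [if_neg hc] at h
        cases hg : pvGetMax cv k adj n vis c with
        | none => rw [hg] at h; cases h
        | some p =>
          obtain ⟨⟨cs, co⟩, vis2⟩ := p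
          rw [hg] at h
          have hx2 : x ∈ vis2 := by
            cases n with
            | zero => cases hg
            | succ n0 =>
              simp only [pvGetMax] at hg
              cases hget : PySem.List.pyGet? cv c with
              | none => rw [hget] at hg; cases hg
              | some tv =>
                rw [hget] at hg
                exact ihn n0 (by omega) _ _ _ _ _ _ hg x (by simp [PySem.Set.mem_add, hx])
          dsimp only at h
          split_ifs at h
          · exact ihr vis2 _ _ out vis' h x hx2
          · exact ihr vis2 _ _ out vis' h x hx2

-- with enough fuel the children loop returns successfully; R is any set of labels,
-- all indexable, closed under the adjacency lists
lemma pvFoldC_suff (cv : List Int) (k : Int) (adj : PySem.Dict Int (List Int))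
    (R : List Int)
    (hR : ∀ x ∈ R, pvGood cv.length x)
    (hadj : ∀ x ∈ R, ∀ c ∈ adj.getD x [], c ∈ R) :
    ∀ n rem vis ts ops, (∀ c ∈ rem, c ∈ R) → pvUC cv.length vis ≤ n →
      ∃ out vis', pvFoldC k (pvGetMax cv k adj n) vis rem ts ops = some (out, vis') := by
  intro n
  induction n using Nat.strong_induction_on with
  | _ n ihn =>
    intro rem
    induction rem with
    | nil =>
      intro vis ts ops _ _
      exact ⟨(ts, ops), vis, rfl⟩
    | cons c rest ihr =>
      intro vis ts ops hrem huc
      by_cases hc : c ∈ vis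
      · obtain ⟨out, vis', h⟩ := ihr vis ts ops (fun d hd => hrem d (by simp [hd])) huc
        refine ⟨out, vis', ?_⟩
        simp only [pvFoldC]
        rw [if_pos hc]
        exact h
      · have hcR : c ∈ R := hrem c (by simp)
        have hgc : pvGood cv.length c := hR c hcR
        have hone := pvUC_add cv.length vis c hgc hc
        cases n with
        | zero => omega
        | succ n0 =>
          obtain ⟨tv, htv⟩ := pvGet_isSome cv c hgc
          obtain ⟨⟨cs, co⟩, vis2, hfold⟩ := ihn n0 (by omega) (adj.getD c []) (PySem.Set.add vis c) tv 0
            (hadj c hcR) (by omega)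
          have hmax : pvGetMax cv k adj (n0 + 1) vis c = some ((cs, co), vis2) := by
            simp only [pvGetMax]
            rw [htv]
            exact hfold
          have hsub : ∀ x ∈ PySem.Set.add vis c, x ∈ vis2 :=
            pvFoldC_mono cv k adj n0 _ _ _ _ _ _ hfold
          have huc2 : pvUC cv.length vis2 ≤ n0 + 1 := by
            have := pvUC_antitone cv.length (PySem.Set.add vis c) vis2 hsub
            omega
          by_cases hsign : cs - k * co ≥ -k
          · obtain ⟨out, vis', h⟩ := ihr vis2 (ts + cs) (ops + co) (fun d hd => hrem d (by simp [hd])) huc2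
            refine ⟨out, vis', ?_⟩
            simp only [pvFoldC]
            rw [if_neg hc, hmax]
            dsimp only
            rw [if_pos hsign]
            exact h
          · obtain ⟨out, vis', h⟩ := ihr vis2 ts (ops + 1) (fun d hd => hrem d (by simp [hd])) huc2
            refine ⟨out, vis', ?_⟩
            simp only [pvFoldC]
            rw [if_neg hc, hmax]
            dsimp only
            rw [if_neg hsign]
            exact h

-- single steps of B's stack machine
lemma pvRun_step_mem (cv : List Int) (k : Int) (adj : PySem.Dict Int (List Int))
    (n : Nat) (vis : PySem.Set Int) (node c : Int) (rem' : List Int) (ts ops : Int)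
    (rest : List (Int × List Int × Int × Int)) (hc : c ∈ vis) :
    pvRun cv k adj (n + 1) vis ((node, c :: rem', ts, ops) :: rest)
      = pvRun cv k adj n vis ((node, rem', ts, ops) :: rest) := by
  simp only [pvRun]
  rw [if_pos hc]

lemma pvRun_step_push (cv : List Int) (k : Int) (adj : PySem.Dict Int (List Int))
    (n : Nat) (vis : PySem.Set Int) (node c : Int) (rem' : List Int) (ts ops tv : Int)
    (rest : List (Int × List Int × Int × Int)) (hc : c ∉ vis)
    (htv : PySem.List.pyGet? cv c = some tv) :
    pvRun cv k adj (n + 1) vis ((node, c :: rem', ts, ops) :: rest)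
      = pvRun cv k adj n (PySem.Set.add vis c)
          ((c, adj.getD c [], tv, 0) :: (node, rem', ts, ops) :: rest) := by
  simp only [pvRun]
  rw [if_neg hc, htv]

lemma pvRun_step_pop (cv : List Int) (k : Int) (adj : PySem.Dict Int (List Int))
    (n : Nat) (vis : PySem.Set Int) (node : Int) (ts ops pn : Int) (prem : List Int)
    (pts pops : Int) (rrest : List (Int × List Int × Int × Int)) :
    pvRun cv k adj (n + 1) vis ((node, [], ts, ops) :: (pn, prem, pts, pops) :: rrest)
      = if ts - k * ops ≥ -k then pvRun cv k adj n vis ((pn, prem, pts + ts, pops + ops) :: rrest)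
        else pvRun cv k adj n vis ((pn, prem, pts, pops + 1) :: rrest) := by
  simp only [pvRun]

lemma pvRun_final (cv : List Int) (k : Int) (adj : PySem.Dict Int (List Int))
    (n : Nat) (vis : PySem.Set Int) (node ts ops : Int) :
    pvRun cv k adj (n + 1) vis [(node, [], ts, ops)] = some (ts - k * ops) := by
  simp only [pvRun]

-- SIMULATION: B's stack machine executes A's children loop step for step: if the loop turns
-- (vis, rem, ts, ops) into ((ts', ops'), vis'), the machine takes t steps from the corresponding
-- frame to the finished frame, for any parent stack below and any spare fuel m
lemma pvSim (cv : List Int) (k : Int) (adj : PySem.Dict Int (List Int)) (E : Nat)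
    (R : List Int)
    (hR : ∀ x ∈ R, pvGood cv.length x)
    (hadj : ∀ x ∈ R, ∀ c ∈ adj.getD x [], c ∈ R)
    (hlen : ∀ x, (adj.getD x []).length ≤ E) :
    ∀ n rem vis ts ops ts' ops' vis',
      (∀ c ∈ rem, c ∈ R) →
      pvFoldC k (pvGetMax cv k adj n) vis rem ts ops = some ((ts', ops'), vis') →
      ∃ t, t + (E + 2) * pvUC cv.length vis' ≤ rem.length + (E + 2) * pvUC cv.length vis ∧
        ∀ m node rest,
          pvRun cv k adj (t + m) vis ((node, rem, ts, ops) :: rest)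
            = pvRun cv k adj m vis' ((node, [], ts', ops') :: rest) := by
  intro n
  induction n using Nat.strong_induction_on with
  | _ n ihn =>
    intro rem
    induction rem with
    | nil =>
      intro vis ts ops ts' ops' vis' _ h
      simp only [pvFoldC, Option.some_inj, Prod.mk.injEq] at h
      obtain ⟨⟨rfl, rfl⟩, rfl⟩ := h
      exact ⟨0, by omega, fun m node rest => by rw [Nat.zero_add]⟩
    | cons c rest ihr =>
      intro vis ts ops ts' ops' vis' hrem h
      simp only [pvFoldC] at h
      by_cases hc : c ∈ vis
      · rw [if_pos hc] at h
        obtain ⟨t, hb, hrun⟩ := ihr vis ts ops ts' ops' vis' (fun d hd => hrem d (by simp [hd])) h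
        refine ⟨t + 1, by simp only [List.length_cons]; omega, ?_⟩
        intro m node rst
        have he : t + 1 + m = (t + m) + 1 := by omega
        rw [he, pvRun_step_mem cv k adj _ vis node c rest ts ops rst hc]
        exact hrun m node rst
      · rw [if_neg hc] at h
        cases hg : pvGetMax cv k adj n vis c with
        | none => rw [hg] at h; cases h
        | some p =>
          obtain ⟨⟨cs, co⟩, vis2⟩ := p
          rw [hg] at h
          dsimp only at h
          cases n with
          | zero => cases hg
          | succ n0 =>
            have hcR : c ∈ R := hrem c (by simp)
            have hgc : pvGood cv.length c := hR c hcR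
            obtain ⟨tv, htv⟩ := pvGet_isSome cv c hgc
            have hfold : pvFoldC k (pvGetMax cv k adj n0) (PySem.Set.add vis c) (adj.getD c []) tv 0
                = some ((cs, co), vis2) := by
              simp only [pvGetMax] at hg
              rw [htv] at hg
              exact hg
            obtain ⟨tc, hbc, hrunc⟩ := ihn n0 (by omega) (adj.getD c []) (PySem.Set.add vis c) tv 0 cs co vis2
              (hadj c hcR) hfold
            have hone := pvUC_add cv.length vis c hgc hc
            have hlc := hlen c
            have hF : (E + 2) * pvUC cv.length vis
                = (E + 2) * pvUC cv.length (PySem.Set.add vis c) + (E + 2) := by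
              rw [hone]; ring
            by_cases hsign : cs - k * co ≥ -k
            · rw [if_pos hsign] at h
              obtain ⟨tr, hbr, hrunr⟩ := ihr vis2 (ts + cs) (ops + co) ts' ops' vis'
                (fun d hd => hrem d (by simp [hd])) h
              refine ⟨tc + tr + 2, ?_, ?_⟩
              · simp only [List.length_cons]
                omega
              · intro m node rst
                have he : tc + tr + 2 + m = (tc + (tr + m + 1)) + 1 := by omega
                rw [he, pvRun_step_push cv k adj _ vis node c rest ts ops tv rst hc htv,
                  hrunc (tr + m + 1) c ((node, rest, ts, ops) :: rst)]
                have he2 : tr + m + 1 = (tr + m) + 1 := rfl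
                rw [he2, pvRun_step_pop, if_pos hsign]
                exact hrunr m node rst
            · rw [if_neg hsign] at h
              obtain ⟨tr, hbr, hrunr⟩ := ihr vis2 ts (ops + 1) ts' ops' vis'
                (fun d hd => hrem d (by simp [hd])) h
              refine ⟨tc + tr + 2, ?_, ?_⟩
              · simp only [List.length_cons]
                omega
              · intro m node rst
                have he : tc + tr + 2 + m = (tc + (tr + m + 1)) + 1 := by omega
                rw [he, pvRun_step_push cv k adj _ vis node c rest ts ops tv rst hc htv,
                  hrunc (tr + m + 1) c ((node, rest, ts, ops) :: rst)]
                have he2 : tr + m + 1 = (tr + m) + 1 := rfl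
                rw [he2, pvRun_step_pop, if_neg hsign]
                exact hrunr m node rst

-- more fuel never changes a successful run of B's machine
lemma pvRun_mono (cv : List Int) (k : Int) (adj : PySem.Dict Int (List Int)) :
    ∀ n m vis st r, n ≤ m → pvRun cv k adj n vis st = some r → pvRun cv k adj m vis st = some r := by
  intro n
  induction n with
  | zero => intro m vis st r _ h; cases h
  | succ n0 ih =>
    intro m vis st r hle h
    obtain ⟨m0, rfl⟩ : ∃ m0, m = m0 + 1 := ⟨m - 1, by omega⟩
    cases st with
    | nil => cases h
    | cons f rest =>
      obtain ⟨node, rem, ts, ops⟩ := f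
      cases rem with
      | cons c rem' =>
        by_cases hc : c ∈ vis
        · rw [pvRun_step_mem cv k adj n0 vis node c rem' ts ops rest hc] at h
          rw [pvRun_step_mem cv k adj m0 vis node c rem' ts ops rest hc]
          exact ih m0 vis _ r (by omega) h
        · cases htv : PySem.List.pyGet? cv c with
          | none =>
            rw [show pvRun cv k adj (n0+1) vis ((node, c :: rem', ts, ops) :: rest) = none by
              simp only [pvRun]; rw [if_neg hc, htv]] at h
            cases h
          | some tv =>
            rw [pvRun_step_push cv k adj n0 vis node c rem' ts ops tv rest hc htv] at h
            rw [pvRun_step_push cv k adj m0 vis node c rem' ts ops tv rest hc htv]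
            exact ih m0 _ _ r (by omega) h
      | nil =>
        cases rest with
        | nil =>
          rw [pvRun_final] at h
          rw [pvRun_final]
          exact h
        | cons p rrest =>
          obtain ⟨pn, prem, pts, pops⟩ := p
          rw [pvRun_step_pop] at h
          rw [pvRun_step_pop]
          split_ifs at h ⊢ with hs
          · exact ih m0 _ _ r (by omega) h
          · exact ih m0 _ _ r (by omega) h

-- ===== VERDICT (by name: the statement is the Claim_ definition above) =====
theorem getMaximumEfficiency_spec : Claim_equal_getMaximumEfficiency := by
  intro cn cf ct cv k hdom hpre
  obtain ⟨hne, hlenc, hreach⟩ := hpre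
  have hlen1 : 1 ≤ cv.length := by
    cases cv with
    | nil => exact absurd rfl hne
    | cons a t => simp
  -- the two ports build the same adjacency dict
  have hadjB : pvBuildAdjB cf ct = pvBuildAdj cf ct := pvBuildAdjB_eq cf ct hlenc
  -- R := the reachable set; its elements are indexable and it is closed under the adjacency
  have hR : ∀ x ∈ pvReach cf ct, pvGood cv.length x := by
    intro x hx
    exact hreach x hx
  have h0R : (0 : Int) ∈ pvReach cf ct := pvReach_zero_mem (pvEdges cf ct) _
  have hedgeiff : ∀ i < cf.length,
      ((cf.getD i 0 - 1) ∈ pvReach cf ct ↔ (ct.getD i 0 - 1) ∈ pvReach cf ct) := by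
    intro i hi
    have hmem : (cf.getD i 0 - 1, ct.getD i 0 - 1) ∈ pvEdges cf ct := by
      unfold pvEdges
      rw [pvZip_eq cf ct hlenc, List.map_map, List.mem_map]
      exact ⟨i, by simp [hi]⟩
    have := pvReach_closed cf ct _ hmem
    exact ⟨this.1, this.2⟩
  have hadjR : ∀ x ∈ pvReach cf ct, ∀ c ∈ (pvBuildAdj cf ct).getD x [], c ∈ pvReach cf ct := by
    intro x hx c hc
    exact pvBuildAdj_good cf ct (· ∈ pvReach cf ct) hedgeiff x hx c hc
  have hlenadj : ∀ x, ((pvBuildAdj cf ct).getD x []).length ≤ 2 * cf.length := pvBuildAdj_len cf ct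
  have hgood0 : pvGood cv.length 0 := hR 0 h0R
  obtain ⟨v0, hv0⟩ := pvGet_isSome cv 0 hgood0
  -- A's recursion succeeds with the given fuel
  obtain ⟨⟨S, O⟩, visF, hfold⟩ :=
    pvFoldC_suff cv k (pvBuildAdj cf ct) (pvReach cf ct) hR hadjR (2 * cv.length)
      ((pvBuildAdj cf ct).getD 0 []) (PySem.Set.add PySem.Set.empty 0) v0 0
      (hadjR 0 h0R) (pvUC_le cv.length _)
  have hA : pvGetMax cv k (pvBuildAdj cf ct) (2 * cv.length + 1) PySem.Set.empty 0
      = some ((S, O), visF) := by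
    simp only [pvGetMax]
    rw [hv0]
    exact hfold
  have hAval : getMaximumEfficiency cn cf ct cv k = S - k * O := by
    show (match pvGetMax cv k (pvBuildAdj cf ct) (2 * cv.length + 1) PySem.Set.empty 0 with
      | some ((s, o), _) => s - k * o
      | none => 0) = S - k * O
    rw [hA]
  -- B's machine simulates that very children loop
  obtain ⟨t, hb, hrun⟩ :=
    pvSim cv k (pvBuildAdj cf ct) (2 * cf.length) (pvReach cf ct) hR hadjR hlenadj (2 * cv.length)
      ((pvBuildAdj cf ct).getD 0 []) (PySem.Set.add PySem.Set.empty 0) v0 0 S O visF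
      (hadjR 0 h0R) hfold
  have hstep : pvRun cv k (pvBuildAdj cf ct) (t + 1) (PySem.Set.add PySem.Set.empty 0)
      [(0, (pvBuildAdj cf ct).getD 0 [], v0, 0)] = some (S - k * O) := by
    rw [hrun 1 0 [], pvRun_final]
  -- the fuel B uses is at least t + 1
  have htb : t + 1 ≤ (2 * cf.length + 2) * (2 * cv.length) + 2 * cf.length + 2 := by
    have h1 : (2 * cf.length + 2) * pvUC cv.length (PySem.Set.add PySem.Set.empty 0)
        ≤ (2 * cf.length + 2) * (2 * cv.length) :=
      Nat.mul_le_mul_left _ (pvUC_le cv.length _)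
    have h2 := hlenadj 0
    have h3 := hb
    generalize (2 * cf.length + 2) * pvUC cv.length (PySem.Set.add PySem.Set.empty 0) = X at h1 h3
    generalize (2 * cf.length + 2) * (2 * cv.length) = Y at h1 ⊢
    generalize (2 * cf.length + 2) * pvUC cv.length visF = Z at h3
    omega
  have hBrun : pvRun cv k (pvBuildAdj cf ct)
      ((2 * cf.length + 2) * (2 * cv.length) + 2 * cf.length + 2)
      (PySem.Set.add PySem.Set.empty 0)
      [(0, (pvBuildAdj cf ct).getD 0 [], v0, 0)] = some (S - k * O) :=
    pvRun_mono cv k (pvBuildAdj cf ct) (t + 1) _ _ _ _ htb hstep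
  have hBval : getMaximumEfficiency_alt cn cf ct cv k = S - k * O := by
    show (match PySem.List.pyGet? cv 0 with
      | none => 0
      | some v0 =>
        (pvRun cv k (pvBuildAdjB cf ct)
            ((2 * cf.length + 2) * (2 * cv.length) + 2 * cf.length + 2)
            (PySem.Set.add PySem.Set.empty 0)
            [(0, (pvBuildAdjB cf ct).getD 0 [], v0, 0)]).getD 0) = S - k * O
    rw [hv0, hadjB]
    show (pvRun cv k (pvBuildAdj cf ct)
        ((2 * cf.length + 2) * (2 * cv.length) + 2 * cf.length + 2)
        (PySem.Set.add PySem.Set.empty 0)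
        [(0, (pvBuildAdj cf ct).getD 0 [], v0, 0)]).getD 0 = S - k * O
    rw [hBrun]
    rfl
  show getMaximumEfficiency cn cf ct cv k = getMaximumEfficiency_alt cn cf ct cv k
  rw [hAval, hBval]
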